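-- pv_equiv track=rewrite | github.com/YoungChanShin/codingtest | programmers/2019_KAKAO/무지의 먹방라이브/05.py | solution
-- ===== SOURCE A (Python) =====
-- def solution(food_times, k):
--     n = len(food_times)
--     s = 0
--     sorted_food = []
--     for i in range(n):
--         sorted_food.append([i+1,food_times[i]])
--         s += food_times[i]
--     if k >= s:
--         return -1
--     sorted_food.sort(key=lambda x: x[1])
--     i = 1
--     acc = sorted_food[0][1] * n
--     while k >= acc:
--         k -= acc
--         acc = (n - i) * (sorted_food[i][1] - sorted_food[i-1][1])
--         i += 1
--     ret = sorted(sorted_food[i-1:], key=lambda x: x[0])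
--     return ret[k%len(ret)][0]
-- ===== SOURCE B (Python) =====
-- def solution(food_times, k):
--     # Binary-search the number T of fully completed passes (no sorting):
--     # eaten(t) = sum(min(f, t)) is monotone; find T with eaten(T) <= k < eaten(T+1),
--     # then the k-th bite lands on the r-th still-alive food (f > T) in index order.
--     s = sum(food_times)
--     if k >= s:
--         return -1
--     lo, hi = 0, max(food_times)
--     while lo < hi:
--         mid = (lo + hi) // 2
--         if sum(min(f, mid + 1) for f in food_times) <= k:
--             lo = mid + 1
--         else:
--             hi = mid
--     r = k - sum(min(f, lo) for f in food_times)
--     for i, f in enumerate(food_times):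
--         if f > lo:
--             if r == 0:
--                 return i + 1
--             r -= 1
-- ===== Notes on version B (the rewrite author's own statement) =====
-- stated objective: alternative
-- what changed: A builds (index,time) pairs, sorts them by time and peels whole 'levels' off the sorted list with a mod trick; B never sorts: it binary-searches the number T of fully completed passes using the monotone function eaten(t)=sum(min(f,t)), then scans once for the r-th food with f>T.
-- outside the precondition, e.g. on solution([2], -3): A returns 1, B returns None; on solution([-1], -2): A returns 1, B returns None; on solution([3, -1], 1): A returns 1, B returns 1
import Mathlib
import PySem

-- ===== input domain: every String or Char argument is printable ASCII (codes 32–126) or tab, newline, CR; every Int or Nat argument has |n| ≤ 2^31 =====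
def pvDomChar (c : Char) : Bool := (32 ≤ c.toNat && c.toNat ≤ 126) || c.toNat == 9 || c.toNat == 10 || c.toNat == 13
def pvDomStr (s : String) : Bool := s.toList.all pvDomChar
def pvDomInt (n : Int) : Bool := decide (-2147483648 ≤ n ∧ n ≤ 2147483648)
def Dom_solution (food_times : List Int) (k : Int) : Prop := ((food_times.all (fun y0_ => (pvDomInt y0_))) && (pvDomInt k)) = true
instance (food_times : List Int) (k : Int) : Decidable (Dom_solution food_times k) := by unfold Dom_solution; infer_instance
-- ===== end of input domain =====

-- B replaces A's sort-the-pairs-and-peel-levels scheme by a sort-free binary search on the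
-- number of completed passes, followed by one scan for the surviving food (objective: alternative; similar cost, no sorting).

-- ===== PORT A =====
-- while k >= acc: k -= acc; acc = (n-i)*(sf[i][1]-sf[i-1][1]); i += 1
-- (fuel = len(sf); inside Pre_ the loop provably stops before the fuel runs out)
def solLoopA (sf : List (Int × Int)) (n : Int) : Nat → Int → Int → Int → Int × Int
  | 0, i, k, _ => (i, k)   -- fuel exhausted: Python's sf[i] would raise IndexError (unreachable under Pre_)
  | fuel + 1, i, k, acc =>
    if acc ≤ k then
      solLoopA sf n fuel (i + 1) (k - acc)
        ((n - i) * ((PySem.List.pyGetD sf i (0, 0)).2 - (PySem.List.pyGetD sf (i - 1) (0, 0)).2))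
    else (i, k)

def solution (food_times : List Int) (k : Int) : Int :=
  let n : Int := food_times.length
  let st := (PySem.List.pyRange 0 n 1).foldl
    (fun (st : List (Int × Int) × Int) i =>
      (st.1 ++ [(i + 1, PySem.List.pyGetD food_times i 0)], st.2 + PySem.List.pyGetD food_times i 0))
    ([], 0)
  if k ≥ st.2 then -1
  else
    let sf := PySem.List.sorted st.1 (fun x => x.2) false
    let ik := solLoopA sf n sf.length 1 k ((PySem.List.pyGetD sf 0 (0, 0)).2 * n)
    let ret := PySem.List.sorted (PySem.List.slice sf (some (ik.1 - 1)) none) (fun x => x.1) false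
    (PySem.List.pyGetD ret (PySem.Int.mod ik.2 (ret.length : Int)) (0, 0)).1

-- ===== PORT B =====
-- while lo < hi: mid = (lo+hi)//2; if sum(min(f, mid+1) for f) <= k: lo = mid+1 else: hi = mid
def bsLoopB (food_times : List Int) (k : Int) (lo hi : Int) : Int :=
  if h : lo < hi then
    let mid := PySem.Int.floordiv (lo + hi) 2
    if (food_times.map (fun f => min f (mid + 1))).sum ≤ k then
      bsLoopB food_times k (mid + 1) hi
    else
      bsLoopB food_times k lo mid
  else lo
termination_by (hi - lo).toNat
decreasing_by
  all_goals
    have hb := PySem.Int.floordiv_two_mid_bounds (lo := lo) (hi := hi) (le_of_lt h)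
    have hlt : PySem.Int.floordiv (lo + hi) 2 < hi := by
      rw [PySem.Int.floordiv_lt_iff_lt_mul (by omega)]; omega
    omega

-- for i, f in enumerate(food_times): if f > lo: if r == 0: return i+1 else r -= 1
def scanLoopB : List (Int × Int) → Int → Int → Int
  | [], _, _ => 0   -- Python falls off the loop, returning None (unreachable under Pre_)
  | (i, f) :: rest, t, r =>
    if t < f then (if r = 0 then i + 1 else scanLoopB rest t (r - 1))
    else scanLoopB rest t r

def solution_alt (food_times : List Int) (k : Int) : Int :=
  let s := food_times.sum
  if k ≥ s then -1
  else
    match PySem.List.max? food_times (fun x => x) with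
    | none => 0   -- max() of the empty list: ValueError (unreachable under Pre_: k < s forces food_times ≠ [])
    | some hi0 =>
      let t := bsLoopB food_times k 0 hi0
      let r := k - (food_times.map (fun f => min f t)).sum
      scanLoopB (PySem.List.enumerate food_times 0) t r

-- ===== PRECONDITION & SPEC =====
-- Pre_ admits every input with k ≥ sum(food_times) (both programs answer -1 there) plus the problem's
-- natural domain (all food times ≥ 0 and k ≥ 0); what it excludes are only k < sum inputs with a negative
-- food time or negative k, where A either raises (IndexError on [] with k < 0) or returns accidental
-- values of its sort/mod arithmetic, and B's scan can fall off the list (Python returns None, not an int).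
def Pre_solution (food_times : List Int) (k : Int) : Prop :=
  food_times.sum ≤ k ∨ (0 ≤ k ∧ ∀ f ∈ food_times, 0 ≤ f)
instance (food_times : List Int) (k : Int) : Decidable (Pre_solution food_times k) := by
  unfold Pre_solution; infer_instance

def pvWitness_solution : List Int × Int := ([3, 1, 2], 5)

def Spec_solution (food_times : List Int) (k : Int) (out : Int) : Prop := out = solution_alt food_times k
instance (food_times : List Int) (k : Int) (out : Int) : Decidable (Spec_solution food_times k out) := by
  unfold Spec_solution; infer_instance

-- ===== CLAIM (what is proved, stated in full; the proofs are below) =====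
def Claim_equal_solution : Prop := ∀ (food_times : List Int) (k : Int), Dom_solution food_times k → Pre_solution food_times k → Spec_solution food_times k (solution food_times k)

-- ===== LEMMAS AND PROOFS =====

-- eaten(t) = sum(min(f, t) for f in L)
def Ecount (L : List Int) (t : Int) : Int := (L.map (fun f => min f t)).sum

theorem Ecount_nil (t : Int) : Ecount [] t = 0 := rfl

theorem Ecount_cons (f : Int) (L : List Int) (t : Int) :
    Ecount (f :: L) t = min f t + Ecount L t := by
  simp [Ecount]

theorem Ecount_zero (L : List Int) (h : ∀ f ∈ L, 0 ≤ f) : Ecount L 0 = 0 := by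
  induction L with
  | nil => rfl
  | cons f L ih =>
    rw [Ecount_cons]
    have := h f (by simp)
    have : min f 0 = 0 := by omega
    rw [this, ih (fun g hg => h g (by simp [hg]))]; ring

theorem Ecount_top (L : List Int) (t : Int) (h : ∀ f ∈ L, f ≤ t) : Ecount L t = L.sum := by
  induction L with
  | nil => rfl
  | cons f L ih =>
    rw [Ecount_cons, List.sum_cons, ih (fun g hg => h g (by simp [hg]))]
    have := h f (by simp)
    have : min f t = f := by omega
    omega

theorem Ecount_mono (L : List Int) {t u : Int} (h : t ≤ u) : Ecount L t ≤ Ecount L u := by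
  induction L with
  | nil => simp [Ecount_nil]
  | cons f L ih =>
    rw [Ecount_cons, Ecount_cons]
    have : min f t ≤ min f u := by omega
    omega

theorem Ecount_step (L : List Int) (a b : Int) (hab : a ≤ b)
    (h : ∀ f ∈ L, f ≤ a ∨ b ≤ f) :
    Ecount L b = Ecount L a + (L.countP (fun f => a < f) : Int) * (b - a) := by
  induction L with
  | nil => simp [Ecount_nil]
  | cons f L ih =>
    rw [Ecount_cons, Ecount_cons, List.countP_cons,
      ih (fun g hg => h g (by simp [hg]))]
    rcases h f (by simp) with hf | hf
    · have h1 : min f b = f := by omega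
      have h2 : min f a = f := by omega
      have h3 : decide (a < f) = false := by simp; omega
      simp [h1, h2, h3]; ring
    · by_cases hfa : a < f
      · have h1 : min f b = b := by omega
        have h2 : min f a = a := by omega
        have h3 : decide (a < f) = true := by simp [hfa]
        simp [h1, h2, h3]; ring
      · -- f ≤ a and b ≤ f forces a = b
        have hba : a = b := by omega
        subst hba
        cases hd : decide (a < f) <;> simp
  
-- uniqueness of the threshold
theorem T_unique (L : List Int) (k T T' : Int)
    (h1 : Ecount L T ≤ k) (h2 : k < Ecount L (T + 1))
    (h1' : Ecount L T' ≤ k) (h2' : k < Ecount L (T' + 1)) : T = T' := by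
  by_contra hne
  rcases lt_or_gt_of_ne hne with hlt | hlt
  · have := Ecount_mono L (show T + 1 ≤ T' by omega)
    omega
  · have := Ecount_mono L (show T' + 1 ≤ T by omega)
    omega

-- the fold that builds sorted_food and s
theorem build_eq (food_times : List Int) :
    (PySem.List.pyRange 0 (food_times.length : Int) 1).foldl
      (fun (st : List (Int × Int) × Int) i =>
        (st.1 ++ [(i + 1, PySem.List.pyGetD food_times i 0)], st.2 + PySem.List.pyGetD food_times i 0))
      ([], 0)
    = ((PySem.List.enumerate food_times 0).map (fun p => (p.1 + 1, p.2)), food_times.sum) := by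
  rw [PySem.List.foldl_prod_mk
        (f := fun acc i => acc ++ [(i + 1, PySem.List.pyGetD food_times i 0)])
        (g := fun acc i => acc + PySem.List.pyGetD food_times i 0)]
  have hlen : (food_times.length : Int) = PySem.List.len food_times := by
    simp [pysem]
  refine Prod.ext ?_ ?_
  · show (PySem.List.pyRange 0 (food_times.length : Int) 1).foldl
        (fun acc i => acc ++ [(i + 1, PySem.List.pyGetD food_times i 0)]) [] = _
    rw [hlen, PySem.List.foldl_append_singleton_eq_map, PySem.List.enumerate_eq_map_pyRange food_times 0,
      List.map_map]
    rfl
  · show (PySem.List.pyRange 0 (food_times.length : Int) 1).foldl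
        (fun acc i => acc + PySem.List.pyGetD food_times i 0) 0 = _
    rw [hlen, PySem.List.foldl_pyRange_zero_pyGetD food_times 0 (fun acc x => acc + x) 0]
    rw [List.sum_eq_foldl]

-- scanLoopB finds the r-th pair whose second component exceeds t
theorem scanLoopB_spec (xs : List (Int × Int)) (t r : Int) (d : Int × Int)
    (h0 : 0 ≤ r) (hr : r.toNat < (xs.filter (fun p => t < p.2)).length) :
    scanLoopB xs t r = ((xs.filter (fun p => t < p.2)).getD r.toNat d).1 + 1 := by
  induction xs generalizing r with
  | nil => simp at hr
  | cons p rest ih =>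
    obtain ⟨i, f⟩ := p
    by_cases hf : t < f
    · rw [show scanLoopB ((i, f) :: rest) t r = if r = 0 then i + 1 else scanLoopB rest t (r - 1) by
        simp [scanLoopB, hf]]
      have hfil : ((i, f) :: rest).filter (fun p => t < p.2) =
          (i, f) :: rest.filter (fun p => t < p.2) := by simp [hf]
      rw [hfil]
      by_cases hr0 : r = 0
      · subst hr0; simp
      · rw [if_neg hr0]
        have h0' : 0 ≤ r - 1 := by omega
        have hrt : r.toNat = (r - 1).toNat + 1 := by omega
        rw [hfil, hrt] at hr
        rw [ih (r - 1) h0' (by simpa using hr), hrt]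
        simp
    · rw [show scanLoopB ((i, f) :: rest) t r = scanLoopB rest t r by simp [scanLoopB, hf]]
      have hfil : ((i, f) :: rest).filter (fun p => t < p.2) =
          rest.filter (fun p => t < p.2) := by simp [hf]
      rw [hfil] at hr ⊢
      exact ih r h0 hr

-- binary-search invariant
theorem bsLoopB_spec (L : List Int) (k : Int) :
    ∀ lo hi, lo ≤ hi → Ecount L lo ≤ k → k < Ecount L (hi + 1) →
      Ecount L (bsLoopB L k lo hi) ≤ k ∧ k < Ecount L (bsLoopB L k lo hi + 1) := by
  intro lo hi
  induction lo, hi using bsLoopB.induct L k with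
  | case1 lo hi h mid hc ih =>
    intro _ hlo hhi
    rw [bsLoopB, dif_pos h, if_pos hc]
    have hb := PySem.Int.floordiv_two_mid_bounds (lo := lo) (hi := hi) (le_of_lt h)
    have hlt : PySem.Int.floordiv (lo + hi) 2 < hi := by
      rw [PySem.Int.floordiv_lt_iff_lt_mul (by omega)]; omega
    exact ih (by omega) hc hhi
  | case2 lo hi h mid hc ih =>
    intro _ hlo hhi
    rw [bsLoopB, dif_pos h, if_neg hc]
    have hb := PySem.Int.floordiv_two_mid_bounds (lo := lo) (hi := hi) (le_of_lt h)
    exact ih (by omega) hlo (by rw [not_le] at hc; exact hc)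
  | case3 lo hi h =>
    intro hle hlo hhi
    rw [bsLoopB, dif_neg h]
    have : lo = hi := by omega
    subst this
    exact ⟨hlo, hhi⟩

-- characterisation of B
theorem B_char (L : List Int) (k : Int) (hk0 : 0 ≤ k) (hL : ∀ f ∈ L, 0 ≤ f) (hks : k < L.sum) :
    ∃ T, Ecount L T ≤ k ∧ k < Ecount L (T + 1) ∧
      solution_alt L k =
        scanLoopB (PySem.List.enumerate L 0) T (k - Ecount L T) := by
  have hne : L ≠ [] := by rintro rfl; simp at hks; omega
  obtain ⟨m, hm⟩ : ∃ m, PySem.List.max? L (fun x => x) = some m := by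
    cases h : PySem.List.max? L (fun x => x) with
    | none => exact absurd ((PySem.List.max?_eq_none_iff L _).1 h) hne
    | some m => exact ⟨m, rfl⟩
  have hmax : ∀ f ∈ L, f ≤ m := PySem.List.max?_isMax hm
  have hm0 : 0 ≤ m := le_trans (hL m (PySem.List.max?_mem hm)) le_rfl
  have htop : Ecount L m = L.sum := Ecount_top L m hmax
  have hT := bsLoopB_spec L k 0 m hm0
    (by rw [Ecount_zero L hL]; exact hk0)
    (by have := Ecount_mono L (show m ≤ m + 1 by omega); omega)
  refine ⟨bsLoopB L k 0 m, hT.1, hT.2, ?_⟩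
  unfold solution_alt
  rw [if_neg (by omega), hm]
  rfl

theorem Ecount_perm {A B : List Int} (h : A.Perm B) (t : Int) : Ecount A t = Ecount B t :=
  (h.map _).sum_eq

-- a list whose prefix of length p is ≤ u and whose suffix is > u has exactly length - p elements > u
theorem countP_partition (V : List Int) (p : Nat) (u : Int) (hp : p ≤ V.length)
    (h1 : ∀ j, j < p → V.getD j 0 ≤ u)
    (h2 : ∀ j, p ≤ j → j < V.length → u < V.getD j 0) :
    V.countP (fun f => u < f) = V.length - p := by
  conv_lhs => rw [← List.take_append_drop p V]
  rw [List.countP_append]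
  have ht : (V.take p).countP (fun f => u < f) = 0 := by
    rw [List.countP_eq_zero]
    intro x hx
    obtain ⟨j, hj, rfl⟩ := List.mem_iff_getElem.1 hx
    have hjp : j < p := by simp at hj; omega
    have hjV : j < V.length := by simp at hj; omega
    have := h1 j hjp
    rw [List.getD_eq_getElem V 0 hjV] at this
    simp [List.getElem_take]
    omega
  have hd : (V.drop p).countP (fun f => u < f) = (V.drop p).length := by
    rw [List.countP_eq_length]
    intro x hx
    obtain ⟨j, hj, rfl⟩ := List.mem_iff_getElem.1 hx
    have hjV : p + j < V.length := by simp at hj; omega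
    have := h2 (p + j) (by omega) hjV
    rw [List.getD_eq_getElem V 0 hjV] at this
    simp [List.getElem_drop]
    omega
  rw [ht, hd, List.length_drop]
  omega

-- same partition fact at the pair level: filtering "snd > u" keeps exactly the suffix
theorem filter_eq_drop (sf : List (Int × Int)) (p : Nat) (u : Int) (hp : p ≤ sf.length)
    (h1 : ∀ j, j < p → (sf.getD j (0, 0)).2 ≤ u)
    (h2 : ∀ j, p ≤ j → j < sf.length → u < (sf.getD j (0, 0)).2) :
    sf.filter (fun q => u < q.2) = sf.drop p := by
  conv_lhs => rw [← List.take_append_drop p sf]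
  rw [List.filter_append]
  have ht : (sf.take p).filter (fun q => u < q.2) = [] := by
    rw [List.filter_eq_nil_iff]
    intro x hx
    obtain ⟨j, hj, rfl⟩ := List.mem_iff_getElem.1 hx
    have hjp : j < p := by simp at hj; omega
    have hjV : j < sf.length := by simp at hj; omega
    have := h1 j hjp
    rw [List.getD_eq_getElem sf (0, 0) hjV] at this
    simp [List.getElem_take]
    omega
  have hd : (sf.drop p).filter (fun q => u < q.2) = sf.drop p := by
    rw [List.filter_eq_self]
    intro x hx
    obtain ⟨j, hj, rfl⟩ := List.mem_iff_getElem.1 hx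
    have hjV : p + j < sf.length := by simp at hj; omega
    have := h2 (p + j) (by omega) hjV
    rw [List.getD_eq_getElem sf (0, 0) hjV] at this
    simp [List.getElem_drop]
    omega
  rw [ht, hd]
  simp

-- the level-peeling loop of A: invariant-carrying run lemma
theorem loopA_run (sf : List (Int × Int)) (n k0 : Int)
    (hn : n = (sf.length : Int))
    (hmono : ∀ p q : Nat, p ≤ q → q < sf.length → (sf.getD p (0, 0)).2 ≤ (sf.getD q (0, 0)).2)
    (hks : k0 < (sf.map (fun q => q.2)).sum) :
    ∀ (fuel : Nat) (i k acc u : Int),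
      fuel = (n - i).toNat + 1 →
      1 ≤ i → i ≤ n →
      0 ≤ k →
      k = k0 - Ecount (sf.map (fun q => q.2)) u →
      acc = (n - i + 1) * ((sf.getD (i - 1).toNat (0, 0)).2 - u) →
      (∀ j : Nat, (j : Int) < i - 1 → (sf.getD j (0, 0)).2 ≤ u) →
      0 ≤ u → u ≤ (sf.getD (i - 1).toNat (0, 0)).2 →
      ∃ (i' u' : Int),
        1 ≤ i' ∧ i' ≤ n ∧ 0 ≤ u' ∧ u' ≤ (sf.getD (i' - 1).toNat (0, 0)).2 ∧
        (∀ j : Nat, (j : Int) < i' - 1 → (sf.getD j (0, 0)).2 ≤ u') ∧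
        solLoopA sf n fuel i k acc = (i', k0 - Ecount (sf.map (fun q => q.2)) u') ∧
        0 ≤ k0 - Ecount (sf.map (fun q => q.2)) u' ∧
        k0 - Ecount (sf.map (fun q => q.2)) u' <
          (n - i' + 1) * ((sf.getD (i' - 1).toNat (0, 0)).2 - u') := by
  intro fuel
  induction fuel with
  | zero => intro i k acc u hfuel; omega
  | succ fuel ih =>
    intro i k acc u hfuel h1i hin hk0 hkE hacc hpre hu0 huv
    set V := sf.map (fun q => q.2) with hV
    have hlenV : V.length = sf.length := by simp [hV]
    have hnlen : n = (sf.length : Int) := hn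
    have hVget : ∀ (j : Nat) (hj : j < V.length), V[j] = (sf.getD j (0, 0)).2 := by
      intro j hj
      rw [List.getD_eq_getElem sf (0, 0) (by omega)]
      simp [hV]
    have hkey : Ecount V (sf.getD (i - 1).toNat (0, 0)).2 =
        Ecount V u + (n - i + 1) * ((sf.getD (i - 1).toNat (0, 0)).2 - u) := by
      rcases eq_or_lt_of_le huv with he | hlt
      · rw [← he]; ring
      · have hsplit : ∀ f ∈ V, f ≤ u ∨ (sf.getD (i - 1).toNat (0, 0)).2 ≤ f := by
          intro f hf
          obtain ⟨j, hj, rfl⟩ := List.mem_iff_getElem.1 hf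
          rw [hVget j hj]
          by_cases hji : (j : Int) < i - 1
          · exact Or.inl (hpre j hji)
          · exact Or.inr (hmono (i - 1).toNat j (by omega) (by omega))
        have hcnt : V.countP (fun f => u < f) = V.length - (i - 1).toNat := by
          apply countP_partition V (i - 1).toNat u (by omega)
          · intro j hj
            have hjlen : j < V.length := by omega
            rw [List.getD_eq_getElem V 0 hjlen, hVget j hjlen]
            exact hpre j (by omega)
          · intro j hjp hjl
            rw [List.getD_eq_getElem V 0 hjl, hVget j hjl]
            have := hmono (i - 1).toNat j (by omega) (by omega)
            omega
        rw [Ecount_step V u _ (le_of_lt hlt) hsplit, hcnt]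
        have hc : ((V.length - (i - 1).toNat : Nat) : Int) = n - i + 1 := by omega
        rw [hc]
    by_cases hca : acc ≤ k
    · -- loop body runs once more
      have hEacc : Ecount V (sf.getD (i - 1).toNat (0, 0)).2 = Ecount V u + acc := by
        rw [hkey, hacc]
      have hiln : i < n := by
        by_contra hcon
        have hieq : i = n := by omega
        have hlast : ∀ f ∈ V, f ≤ (sf.getD (i - 1).toNat (0, 0)).2 := by
          intro f hf
          obtain ⟨j, hj, rfl⟩ := List.mem_iff_getElem.1 hf
          rw [hVget j hj]
          exact hmono j (i - 1).toNat (by omega) (by omega)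
        have htop := Ecount_top V _ hlast
        omega
      have hig : PySem.List.pyGetD sf i (0, 0) = sf.getD i.toNat (0, 0) := by
        rw [PySem.List.pyGetD_eq_getElem sf (0, 0) (by omega) (by omega),
          List.getD_eq_getElem sf (0, 0) (by omega)]
      have hig1 : PySem.List.pyGetD sf (i - 1) (0, 0) = sf.getD (i - 1).toNat (0, 0) := by
        rw [PySem.List.pyGetD_eq_getElem sf (0, 0) (by omega) (by omega),
          List.getD_eq_getElem sf (0, 0) (by omega)]
      rw [show solLoopA sf n (fuel + 1) i k acc =
          solLoopA sf n fuel (i + 1) (k - acc)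
            ((n - i) * ((PySem.List.pyGetD sf i (0, 0)).2 - (PySem.List.pyGetD sf (i - 1) (0, 0)).2))
          by simp [solLoopA, hca]]
      rw [hig, hig1]
      exact ih (i + 1) (k - acc) _ ((sf.getD (i - 1).toNat (0, 0)).2)
        (by omega) (by omega) (by omega) (by omega)
        (by omega)
        (by have h1 : ((i + 1 - 1 : Int)).toNat = i.toNat := by omega
            rw [h1]; ring_nf)
        (by intro j hj
            exact hmono j (i - 1).toNat (by omega) (by omega))
        (by omega)
        (by have h1 : ((i + 1 - 1 : Int)).toNat = i.toNat := by omega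
            rw [h1]
            exact hmono (i - 1).toNat i.toNat (by omega) (by omega))
    · -- exit
      refine ⟨i, u, h1i, hin, hu0, huv, hpre, ?_, by omega, by omega⟩
      rw [show solLoopA sf n (fuel + 1) i k acc = (i, k) by simp [solLoopA, hca], hkE]

-- characterisation of A
theorem A_char (L : List Int) (k : Int) (hk0 : 0 ≤ k) (hL : ∀ f ∈ L, 0 ≤ f) (hks : k < L.sum) :
    ∃ T, Ecount L T ≤ k ∧ k < Ecount L (T + 1) ∧
      solution L k =
        scanLoopB (PySem.List.enumerate L 0) T (k - Ecount L T) := by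
  have hb := build_eq L
  set P := (PySem.List.enumerate L 0).map (fun p => (p.1 + 1, p.2)) with hPdef
  set sf := PySem.List.sorted P (fun x => x.2) false with hsfdef
  set n : Int := (L.length : Int) with hndef
  have hlen : sf.length = L.length := by
    rw [hsfdef, PySem.List.length_sorted, hPdef, List.length_map, PySem.List.length_enumerate]
  have hperm : sf.Perm P := PySem.List.sorted_perm P _ false
  have hPsnd : P.map (fun q => q.2) = L := by
    rw [hPdef, List.map_map]
    exact PySem.List.map_snd_enumerate L 0
  have hVperm : (sf.map (fun q => q.2)).Perm L := hPsnd ▸ (hperm.map _)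
  have hE : ∀ t, Ecount (sf.map (fun q => q.2)) t = Ecount L t := fun t => Ecount_perm hVperm t
  have hpos : ∀ q ∈ sf, 0 ≤ q.2 := by
    intro q hq
    exact hL q.2 (hVperm.mem_iff.mp (List.mem_map_of_mem hq))
  have hmono : ∀ p q : Nat, p ≤ q → q < sf.length →
      (sf.getD p (0, 0)).2 ≤ (sf.getD q (0, 0)).2 := by
    intro p q hpq hq
    rw [List.getD_eq_getElem _ _ (lt_of_le_of_lt hpq hq), List.getD_eq_getElem _ _ hq]
    exact PySem.List.key_sorted_getElem_mono P (fun x => x.2) hpq (by rw [← hsfdef]; exact hq)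
  have hne : L ≠ [] := by
    rintro rfl
    simp at hks
    omega
  have hlnat : 0 < L.length := List.length_pos_iff.2 hne
  have hlen1 : 1 ≤ n := by rw [hndef]; exact_mod_cast hlnat
  have hsum : (sf.map (fun q => q.2)).sum = L.sum := hVperm.sum_eq
  have hposL : ∀ f ∈ sf.map (fun q => q.2), 0 ≤ f := by
    intro f hf
    exact hL f (hVperm.mem_iff.mp hf)
  have hig0 : PySem.List.pyGetD sf 0 (0, 0) = sf.getD (0 : Nat) (0, 0) := by
    rw [PySem.List.pyGetD_eq_getElem sf (0, 0) (by omega) (by rw [hlen]; exact_mod_cast hlnat)]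
    rw [List.getD_eq_getElem sf (0, 0) (by omega)]
    norm_num
  have hv00 : 0 ≤ (sf.getD ((1 : Int) - 1).toNat (0, 0)).2 := by
    have h0 : (0 : Nat) < sf.length := by omega
    have : ((1 : Int) - 1).toNat = 0 := by omega
    rw [this, List.getD_eq_getElem sf (0, 0) h0]
    exact hpos _ (List.getElem_mem h0)
  obtain ⟨i', u', h1i, hin, hu0, huv, hpre, hrun, hk'0, hk'lt⟩ :=
    loopA_run sf n k (by rw [hlen]) hmono (by rw [hsum]; exact hks)
      sf.length 1 k ((PySem.List.pyGetD sf 0 (0, 0)).2 * n) 0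
      (by omega) le_rfl hlen1 hk0
      (by rw [Ecount_zero _ hposL]; omega)
      (by rw [hig0]
          have h1 : ((1 : Int) - 1).toNat = (0 : Nat) := by omega
          rw [h1]; ring)
      (by intro j hj; omega)
      le_rfl hv00
  rw [hE] at hrun hk'0 hk'lt
  set v := (sf.getD (i' - 1).toNat (0, 0)).2 with hvdef
  set k' := k - Ecount L u' with hk'def
  set m := n - i' + 1 with hmdef
  have hm0 : 0 < m := by omega
  have hvu : u' < v := by
    by_contra hcon
    rw [not_lt] at hcon
    have h1 : v - u' ≤ 0 := by omega
    have h2 : m * (v - u') ≤ 0 := mul_nonpos_of_nonneg_of_nonpos (by omega) h1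
    omega
  set fd := PySem.Int.floordiv k' m with hfddef
  set md := PySem.Int.mod k' m with hmddef
  have hfd0 : 0 ≤ fd := by
    rw [hfddef]
    have := (PySem.Int.le_floordiv_iff_mul_le (a := k') (q := 0) hm0).2 (by omega)
    omega
  have hfdlt : fd < v - u' := by
    rw [hfddef]
    exact (PySem.Int.floordiv_lt_iff_lt_mul hm0).2 (by rw [mul_comm]; omega)
  have hmd0 : 0 ≤ md := PySem.Int.mod_nonneg k' hm0
  have hmdlt : md < m := PySem.Int.mod_lt k' hm0
  have hfm : fd * m + md = k' := PySem.Int.floordiv_mul_add_mod k' m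
  set T := u' + fd with hTdef
  have hsplitL : ∀ f ∈ L, f ≤ u' ∨ v ≤ f := by
    intro f hf
    obtain ⟨q, hq, rfl⟩ := List.mem_map.1 (hVperm.mem_iff.mpr hf)
    obtain ⟨j, hj, rfl⟩ := List.mem_iff_getElem.1 hq
    rw [← List.getD_eq_getElem sf (0, 0) hj]
    by_cases hji : (j : Int) < i' - 1
    · exact Or.inl (hpre j hji)
    · exact Or.inr (hmono (i' - 1).toNat j (by omega) (by omega))
  have hcntL : (L.countP (fun f => u' < f) : Int) = m := by
    rw [← hVperm.countP_eq]
    have hc := countP_partition (sf.map (fun q => q.2)) (i' - 1).toNat u'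
      (by rw [List.length_map]; omega)
      (by intro j hj
          have hjl : j < sf.length := by omega
          rw [List.getD_eq_getElem _ 0 (by rw [List.length_map]; omega)]
          rw [List.getElem_map]
          rw [← List.getD_eq_getElem sf (0, 0) hjl]
          exact hpre j (by omega))
      (by intro j hjp hjl
          rw [List.length_map] at hjl
          rw [List.getD_eq_getElem _ 0 (by rw [List.length_map]; omega)]
          rw [List.getElem_map]
          rw [← List.getD_eq_getElem sf (0, 0) hjl]
          have := hmono (i' - 1).toNat j (by omega) hjl
          omega)
    rw [hc, List.length_map]
    omega
  have hET : Ecount L T = Ecount L u' + m * fd := by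
    rw [Ecount_step L u' T (by omega)
      (by intro f hf; rcases hsplitL f hf with h | h
          · exact Or.inl h
          · exact Or.inr (by omega)), hcntL]
    have : T - u' = fd := by omega
    rw [this]
  have hET1 : Ecount L (T + 1) = Ecount L u' + m * (fd + 1) := by
    rw [Ecount_step L u' (T + 1) (by omega)
      (by intro f hf; rcases hsplitL f hf with h | h
          · exact Or.inl h
          · exact Or.inr (by omega)), hcntL]
    have : T + 1 - u' = fd + 1 := by omega
    rw [this]
  have hmfd : m * fd = fd * m := mul_comm m fd
  have hmfd1 : m * (fd + 1) = fd * m + m := by ring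
  refine ⟨T, by linarith, by linarith, ?_⟩
  have hrT : k - Ecount L T = md := by linarith
  -- reduce solution L k to its else branch
  have hdrop : sf.filter (fun q => u' < q.2) = sf.drop (i' - 1).toNat :=
    filter_eq_drop sf (i' - 1).toNat u' (by omega)
      (fun j hj => hpre j (by omega))
      (fun j hjp hjl => by
        have := hmono (i' - 1).toNat j hjp hjl
        omega)
  have hpairP : P.Pairwise (fun a b => a.1 < b.1) := by
    rw [hPdef, List.pairwise_map]
    exact (PySem.List.pairwise_lt_enumerate L 0).imp (by intro a b h; omega)
  have hretEq : PySem.List.sorted (sf.drop (i' - 1).toNat) (fun x => x.1) false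
      = P.filter (fun q => u' < q.2) := by
    apply PySem.List.sorted_eq_of_perm_of_pairwise_lt
    · rw [← hdrop]
      exact (hperm.filter _).symm
    · exact hpairP.filter _
  have hfilswitch : P.filter (fun q => u' < q.2) = P.filter (fun q => T < q.2) := by
    apply List.filter_congr
    intro q hq
    have hq2 : q.2 ∈ L := by
      rw [← hPsnd]
      exact List.mem_map_of_mem hq
    rcases hsplitL q.2 hq2 with h | h
    · simp only [decide_eq_decide]
      omega
    · simp only [decide_eq_decide]
      omega
  have hmapfil : P.filter (fun q => T < q.2)
      = ((PySem.List.enumerate L 0).filter (fun q => T < q.2)).map (fun p => (p.1 + 1, p.2)) := by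
    rw [hPdef, List.filter_map]
    rfl
  have hreln : (P.filter (fun q => u' < q.2)).length = sf.length - (i' - 1).toNat := by
    rw [← (hperm.filter _).length_eq, hdrop, List.length_drop]
  have hlenfil : ((P.filter (fun q => u' < q.2)).length : Int) = m := by
    rw [hreln]
    omega
  -- compute A's value
  have hsol : solution L k
      = (PySem.List.pyGetD (P.filter (fun q => u' < q.2))
          (PySem.Int.mod k' ((P.filter (fun q => u' < q.2)).length : Int)) (0, 0)).1 := by
    unfold solution
    rw [← hndef]
    simp only [hb]
    rw [if_neg (by omega)]
    rw [← hsfdef]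
    rw [hrun]
    rw [PySem.List.slice_from sf (by omega)]
    rw [hretEq]
  rw [hsol, hlenfil]
  have hmd_eq : PySem.Int.mod k' m = md := rfl
  rw [hmd_eq]
  -- bridge pyGetD to getElem
  have hmdlen : md.toNat < (P.filter (fun q => u' < q.2)).length := by omega
  rw [PySem.List.pyGetD_eq_getElem _ (0, 0) hmd0 (by rw [hlenfil]; omega)]
  -- B-side scan
  rw [hrT, scanLoopB_spec (PySem.List.enumerate L 0) T md (0, 0) hmd0
    (by rw [← List.length_map (f := fun p => ((p.1 : Int) + 1, p.2)), ← hmapfil, ← hfilswitch]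
        omega)]
  rw [List.getD_eq_getElem _ (0, 0)
    (by rw [← List.length_map (f := fun p => ((p.1 : Int) + 1, p.2)), ← hmapfil, ← hfilswitch]; omega)]
  have hgm : (P.filter (fun q => u' < q.2))[md.toNat]'hmdlen
      = (fun p => ((p.1 : Int) + 1, p.2)) (((PySem.List.enumerate L 0).filter (fun q => T < q.2))[md.toNat]'(by
          rw [← List.length_map (f := fun p => ((p.1 : Int) + 1, p.2)), ← hmapfil, ← hfilswitch]; omega)) := by
    have := hfilswitch.trans hmapfil
    simp only [this]
    rw [List.getElem_map]
  rw [hgm]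

-- ===== VERDICT (by name: the statement is the Claim_ definition above) =====
theorem solution_spec : Claim_equal_solution := by
  intro L k _ hP
  unfold Spec_solution
  by_cases hks : k ≥ L.sum
  · have hb := build_eq L
    unfold solution solution_alt
    simp only [hb]
    rw [if_pos hks, if_pos hks]
  · rw [not_le] at hks
    have hPre : 0 ≤ k ∧ ∀ f ∈ L, 0 ≤ f := hP.resolve_left (by omega)
    obtain ⟨T, hT1, hT2, hA⟩ := A_char L k hPre.1 hPre.2 hks
    obtain ⟨T', hT1', hT2', hB⟩ := B_char L k hPre.1 hPre.2 hks
    have := T_unique L k T T' hT1 hT2 hT1' hT2'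
    subst this
    rw [hA, hB]
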